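-- pv_equiv track=rewrite | github.com/khjeon5328/today_algorithm | 2021/2021.07월/20일/1759.py | check
-- ===== SOURCE A (Python) =====
-- vowels = ['a', 'e', 'i', 'o', 'u']
--
-- def check(code):
--     constant = vowel = 0
--     for i in code:
--         if i in vowels:
--             vowel += 1
--         else:
--             constant += 1
--         if vowel > 0 and constant > 1:
--             return True
--     return False
-- ===== SOURCE B (Python) =====
-- def check(code):
--     cons = code
--     for v in 'aeiou':
--         cons = cons.replace(v, '')
--     return len(cons) >= 2 and len(cons) < len(code)
-- ===== Notes on version B (the rewrite author's own statement) =====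
-- stated objective: alternative
-- what changed: Instead of classifying each character with a two-counter early-exit loop, B rewrites the string itself: it deletes each vowel with a staged str.replace pass and decides by length arithmetic on the residue (len(cons) >= 2 consonants, len(cons) < len(code) means a vowel was removed).
import Mathlib
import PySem

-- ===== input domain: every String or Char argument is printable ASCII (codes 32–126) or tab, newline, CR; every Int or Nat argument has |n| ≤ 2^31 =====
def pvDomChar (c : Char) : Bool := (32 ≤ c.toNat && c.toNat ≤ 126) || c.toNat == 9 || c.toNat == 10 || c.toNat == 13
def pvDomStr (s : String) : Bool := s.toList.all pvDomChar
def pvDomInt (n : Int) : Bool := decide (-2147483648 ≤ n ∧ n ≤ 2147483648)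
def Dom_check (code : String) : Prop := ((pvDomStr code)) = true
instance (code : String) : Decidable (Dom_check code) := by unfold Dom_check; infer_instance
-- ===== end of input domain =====

-- B deletes each vowel with a staged replace pass and decides by length arithmetic
-- on the vowel-free residue; A's early-exit two-counter loop returns the same Bool.

-- ===== PORT A =====
def vowelsA : List Char := ['a', 'e', 'i', 'o', 'u']

-- the for-loop of A, carrying (vowel, constant) and the early return
def checkLoop : List Char → Nat → Nat → Bool
  | [], _, _ => false
  | i :: rest, vowel, constant =>
    let vowel' := if vowelsA.contains i then vowel + 1 else vowel
    let constant' := if vowelsA.contains i then constant else constant + 1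
    if vowel' > 0 && constant' > 1 then true else checkLoop rest vowel' constant'

def check (code : String) : Bool := checkLoop code.toList 0 0

-- ===== PORT B =====
-- cons = code; for v in 'aeiou': cons = cons.replace(v, '')
def check_alt (code : String) : Bool :=
  let cons := "aeiou".toList.foldl (fun s v => PySem.Str.replace s (String.singleton v) "") code
  decide (PySem.Str.len cons ≥ 2) && decide (PySem.Str.len cons < PySem.Str.len code)

-- ===== PRECONDITION & SPEC =====
def Spec_check (code : String) (out : Bool) : Prop := out = check_alt code
instance (code : String) (out : Bool) : Decidable (Spec_check code out) := by unfold Spec_check; infer_instance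

-- ===== CLAIM (what is proved, stated in full; the proofs are below) =====
def Claim_equal_check : Prop := ∀ (code : String), Dom_check code → Spec_check code (check code)

-- ===== LEMMAS AND PROOFS =====

def countV (l : List Char) : Nat := l.countP (fun i => vowelsA.contains i)
def countC (l : List Char) : Nat := l.countP (fun i => !vowelsA.contains i)

theorem countV_cons (i : Char) (r : List Char) :
    countV (i :: r) = countV r + (if vowelsA.contains i then 1 else 0) := by
  unfold countV; rw [List.countP_cons]

theorem countC_cons (i : Char) (r : List Char) :
    countC (i :: r) = countC r + (if vowelsA.contains i then 0 else 1) := by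
  unfold countC; rw [List.countP_cons]; cases h : vowelsA.contains i <;> simp

theorem countV_add_countC (l : List Char) : countV l + countC l = l.length := by
  induction l with
  | nil => rfl
  | cons i r ih =>
    rw [countV_cons, countC_cons, List.length_cons]
    split <;> omega

theorem checkLoop_iff (l : List Char) : ∀ (v c : Nat),
    checkLoop l v c = true ↔
      1 ≤ l.length ∧ 1 ≤ v + countV l ∧ 2 ≤ c + countC l := by
  induction l with
  | nil => intro v c; simp [checkLoop]
  | cons i rest ih =>
    intro v c
    simp only [checkLoop]
    by_cases hv : vowelsA.contains i = true
    · simp only [hv, if_true, countV_cons, countC_cons, List.length_cons]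
      by_cases hc : c > 1
      · have hb : (decide (v + 1 > 0) && decide (c > 1)) = true := by simp [hc]
        rw [hb, if_pos rfl]
        simp only [true_iff]
        omega
      · have hb : (decide (v + 1 > 0) && decide (c > 1)) = false := by simp; omega
        rw [hb]
        simp only [Bool.false_eq_true, if_false, ih]
        have := countV_add_countC rest
        omega
    · simp only [hv, if_false, countV_cons, countC_cons, List.length_cons, Bool.false_eq_true]
      by_cases hb : (decide (v > 0) && decide (c + 1 > 1)) = true
      · rw [hb, if_pos rfl]
        simp only [Bool.and_eq_true, decide_eq_true_iff] at hb
        simp only [true_iff]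
        omega
      · rw [Bool.not_eq_true] at hb
        rw [hb]
        simp only [Bool.false_eq_true, if_false, ih]
        have hb' : ¬ (v > 0) ∨ ¬ (c + 1 > 1) := by
          rw [Bool.and_eq_false_iff] at hb
          rcases hb with h | h <;> [left; right] <;> simpa using h
        have := countV_add_countC rest
        omega

-- deleting one character with replace(v, '') is a filter
theorem replace_go_single (v : Char) : ∀ (fuel : Nat) (l acc : List Char),
    l.length ≤ fuel →
    PySem.Chars.replace.go [v] [] fuel l acc = acc.reverse ++ l.filter (fun c => c ≠ v) := by
  intro fuel
  induction fuel with
  | zero =>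
    intro l acc h
    have : l = [] := List.eq_nil_of_length_eq_zero (Nat.le_zero.mp h)
    subst this; simp [PySem.Chars.replace.go]
  | succ n ih =>
    intro l acc h
    cases l with
    | nil => simp [PySem.Chars.replace.go]
    | cons c t =>
      simp only [PySem.Chars.replace.go]
      by_cases hc : c = v
      · subst hc
        have hp : List.isPrefixOf [c] (c :: t) = true := by
          simp [List.isPrefixOf]
        rw [if_pos hp]
        have := ih t acc (by simpa using Nat.lt_succ_iff.mp (by simpa using h))
        simpa using this
      · have hp : List.isPrefixOf [v] (c :: t) = true ↔ False := by
          simp [List.isPrefixOf]; exact fun h' => hc h'.symm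
        rw [if_neg (by simp [List.isPrefixOf]; exact fun h' => hc h'.symm)]
        have := ih t (c :: acc) (by simpa using Nat.lt_succ_iff.mp (by simpa using h))
        rw [this]
        simp [hc]

theorem replace_single_toList (s : String) (v : Char) :
    (PySem.Str.replace s (String.singleton v) "").toList
      = s.toList.filter (fun c => c ≠ v) := by
  rw [PySem.Str.toList_replace]
  have hv : (String.singleton v).toList = [v] := by simp [String.singleton]
  rw [hv]
  show PySem.Chars.replace s.toList [v] [] = _
  unfold PySem.Chars.replace
  rw [if_neg (by simp)]
  simpa using replace_go_single v s.toList.length s.toList [] le_rfl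

theorem foldl_replace_toList (vs : List Char) : ∀ (s : String),
    (vs.foldl (fun s v => PySem.Str.replace s (String.singleton v) "") s).toList
      = s.toList.filter (fun c => !vs.contains c) := by
  induction vs with
  | nil => intro s; simp
  | cons v rest ih =>
    intro s
    rw [List.foldl_cons, ih, replace_single_toList, List.filter_filter]
    apply List.filter_congr
    intro c _
    cases h : rest.contains c <;> by_cases hc : c = v <;>
      simp_all [List.contains_eq_mem]

theorem vowels_contains (c : Char) :
    ("aeiou".toList.contains c) = vowelsA.contains c := by
  have : "aeiou".toList = vowelsA := by decide
  rw [this]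

theorem check_alt_countC (code : String) :
    check_alt code
      = (decide ((countC code.toList : Int) ≥ 2) && decide ((countC code.toList : Int) < (code.toList.length : Int))) := by
  unfold check_alt
  have h := foldl_replace_toList "aeiou".toList code
  have hl : (("aeiou".toList.foldl (fun s v => PySem.Str.replace s (String.singleton v) "") code)).toList.length
      = countC code.toList := by
    rw [h]
    unfold countC
    rw [List.countP_eq_length_filter]
    have : (fun c => !"aeiou".toList.contains c) = (fun i => !vowelsA.contains i) := by
      funext c; rw [vowels_contains]
    rw [this]
  simp only [PySem.Str.len_eq, hl]

-- ===== VERDICT (by name: the statement is the Claim_ definition above) =====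
theorem check_spec : Claim_equal_check := by
  intro code _
  unfold Spec_check check
  rw [check_alt_countC, Bool.eq_iff_iff, checkLoop_iff]
  have h := countV_add_countC code.toList
  simp only [Bool.and_eq_true, decide_eq_true_iff, ge_iff_le]
  omega
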